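-- pv_equiv track=rewrite | github.com/flavin/comic-collator | main.py | process
-- ===== SOURCE A (Python) =====
-- import math
--
-- def process(total: int) -> list:
--     list_of_pages = []
--     total_pages = math.ceil(total/4)
--     index_for_pages = 0
--
--     for i in range(1, total_pages+1):
--         reverse_index = (total_pages * 2) - i + 1
--         list_of_pages.append(reverse_index * 2)
--         list_of_pages.append(2 * i - 1)
--         list_of_pages.append(2 * i)
--         list_of_pages.append(reverse_index * 2 - 1)
--
--     return list_of_pages
-- ===== SOURCE B (Python) =====
-- import math
--
-- def process(total: int) -> list:
--     n = math.ceil(total / 4)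
--
--     def page(m):
--         # closed-form imposition permutation: value of output position m
--         q, r = m // 4, m % 4
--         if r == 0:
--             return 4 * n - 2 * q
--         if r == 3:
--             return 4 * n - 2 * q - 1
--         return 2 * q + r
--
--     return [page(m) for m in range(4 * n)]
-- ===== Notes on version B (the rewrite author's own statement) =====
-- stated objective: alternative
-- what changed: B replaces A's sheet loop that appends four pages per iteration by a closed-form permutation formula: it maps each output position m directly to its page number, building the list positionally with no per-sheet quad construction or reverse-index state.
import Mathlib
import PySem

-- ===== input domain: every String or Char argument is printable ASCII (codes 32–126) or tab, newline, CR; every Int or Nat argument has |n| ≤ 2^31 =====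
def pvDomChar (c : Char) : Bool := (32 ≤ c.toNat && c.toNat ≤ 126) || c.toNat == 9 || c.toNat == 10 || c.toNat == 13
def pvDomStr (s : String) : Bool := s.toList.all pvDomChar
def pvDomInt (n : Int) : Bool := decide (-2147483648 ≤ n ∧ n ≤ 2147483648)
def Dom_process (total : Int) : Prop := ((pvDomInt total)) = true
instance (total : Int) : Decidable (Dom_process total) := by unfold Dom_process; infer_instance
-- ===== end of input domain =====

-- B replaces A's sheet loop (four appends per iteration, reverse-index arithmetic) by a
-- closed-form per-output-position permutation formula; objective: alternative (same cost).

-- ===== PORT A =====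
def process (total : Int) : List Int :=
  -- math.ceil(total/4) (total/4 is exact in float for |total| ≤ 2^31): ⌈t/4⌉ = -((-t) // 4)
  let total_pages := -(PySem.Int.floordiv (-total) 4)
  (PySem.List.pyRange 1 (total_pages + 1) 1).foldl
    (fun acc i =>
      let reverse_index := total_pages * 2 - i + 1
      acc ++ [reverse_index * 2, 2 * i - 1, 2 * i, reverse_index * 2 - 1]) []

-- ===== PORT B =====
-- Source B's inner helper 'page' (n is the enclosing n); m // 4 and m % 4 via PySem floordiv/mod
def page (n m : Int) : Int :=
  let q := PySem.Int.floordiv m 4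
  let r := PySem.Int.mod m 4
  if r = 0 then 4 * n - 2 * q
  else if r = 3 then 4 * n - 2 * q - 1
  else 2 * q + r

def process_alt (total : Int) : List Int :=
  -- math.ceil(total/4), same exact integer ceiling as in port A
  let n := -(PySem.Int.floordiv (-total) 4)
  (PySem.List.pyRange 0 (4 * n) 1).map (page n)

-- ===== PRECONDITION & SPEC =====
def Spec_process (total : Int) (out : List Int) : Prop := out = process_alt total
instance (total : Int) (out : List Int) : Decidable (Spec_process total out) := by unfold Spec_process; infer_instance

-- ===== CLAIM =====
def Claim_equal_process : Prop := ∀ (total : Int), Dom_process total → Spec_process total (process total)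

-- ===== LEMMAS AND PROOFS =====

-- page at position 4*k + r (r < 4) in closed form
theorem page_val (n : Int) (k r : ℕ) (hr : r < 4) :
    page n (4 * (k : Int) + r) =
      if r = 0 then 4 * n - 2 * k
      else if r = 3 then 4 * n - 2 * k - 1
      else 2 * k + r := by
  have hq : PySem.Int.floordiv (4 * (k : Int) + r) 4 = k := by
    simp only [PySem.Int.floordiv]
    rw [Int.fdiv_eq_ediv]
    simp only [show (0:Int) ≤ 4 by omega, true_or, if_pos]
    omega
  have hm : PySem.Int.mod (4 * (k : Int) + r) 4 = r := by
    simp only [PySem.Int.mod]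
    rw [Int.fmod_eq_emod]
    simp only [show (0:Int) ≤ 4 by omega, true_or, if_pos]
    omega
  unfold page
  rw [hq, hm]
  interval_cases r <;> norm_num

-- the first k sheets of A equal the first 4*k positions of B's formula
theorem quads_eq_map (N : ℕ) : ∀ k : ℕ, k ≤ N →
    (List.range k).flatMap (fun (j : ℕ) =>
      [((N : Int) * 2 - (1 + j) + 1) * 2, 2 * (1 + j) - 1, 2 * (1 + j),
       ((N : Int) * 2 - (1 + j) + 1) * 2 - 1]) =
    (List.range (4 * k)).map (fun (m : ℕ) => page N ((0 : Int) + m)) := by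
  intro k
  induction k with
  | zero => intro _; rfl
  | succ k ih =>
    intro hk
    rw [List.range_succ, List.flatMap_append, ih (by omega), List.flatMap_singleton]
    rw [show 4 * (k + 1) = (4 * k) + 1 + 1 + 1 + 1 by omega]
    rw [List.range_succ, List.range_succ, List.range_succ, List.range_succ]
    simp only [List.map_append, List.map_cons, List.map_nil, List.append_assoc]
    congr 1
    have e0 : ((0 : Int) + (4 * k : ℕ)) = 4 * (k : Int) + (0 : ℕ) := by push_cast; ring
    have e1 : ((0 : Int) + (4 * k + 1 : ℕ)) = 4 * (k : Int) + (1 : ℕ) := by push_cast; ring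
    have e2 : ((0 : Int) + (4 * k + 2 : ℕ)) = 4 * (k : Int) + (2 : ℕ) := by push_cast; ring
    have e3 : ((0 : Int) + (4 * k + 3 : ℕ)) = 4 * (k : Int) + (3 : ℕ) := by push_cast; ring
    rw [e0, e1, e2, e3,
        page_val N k 0 (by omega), page_val N k 1 (by omega),
        page_val N k 2 (by omega), page_val N k 3 (by omega)]
    norm_num
    refine ⟨by push_cast; ring, by push_cast; ring, by push_cast; ring, by push_cast; ring⟩

-- the core identity: A's sheet loop equals B's positional map
theorem pv_core (n : Int) :
    (PySem.List.pyRange 1 (n + 1) 1).foldl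
      (fun acc i =>
        let reverse_index := n * 2 - i + 1
        acc ++ [reverse_index * 2, 2 * i - 1, 2 * i, reverse_index * 2 - 1]) [] =
    (PySem.List.pyRange 0 (4 * n) 1).map (page n) := by
  by_cases hn : n ≤ 0
  · rw [PySem.List.pyRange_one_eq_nil (by omega : n + 1 ≤ 1),
        PySem.List.pyRange_one_eq_nil (by omega : 4 * n ≤ 0)]
    rfl
  · obtain ⟨N, rfl⟩ := Int.eq_ofNat_of_zero_le (by omega : (0:Int) ≤ n)
    rw [PySem.List.foldl_append_eq_flatMap, List.nil_append]
    rw [PySem.List.pyRange_one 1 ((N : Int) + 1), List.flatMap_map]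
    rw [show (((N : Int) + 1 - 1).toNat) = N by omega]
    rw [PySem.List.pyRange_one 0 (4 * (N : Int)), List.map_map]
    rw [show ((4 * (N : Int) - 0).toNat) = 4 * N by omega]
    exact quads_eq_map N N (le_refl N)

-- ===== VERDICT =====
theorem process_spec : Claim_equal_process := by
  intro total _
  unfold Spec_process process process_alt
  exact pv_core (-(PySem.Int.floordiv (-total) 4))
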